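-- pv_equiv track=rewrite | github.com/2018hsridhar/LEETCODE_REPO_2 | leetcode_840.py | getColSums
-- ===== SOURCE A (Python) =====
-- from typing import List
--
-- def getColSums(grid: List[List[int]]) -> List[List[int]]:
--     m = len(grid)
--     n = len(grid[0])
--     colSums = [[0 for j in range(n)] for i in range(m)]
--     for j in range(n):
--         runSum = 0
--         for i in range(m):
--             runSum += grid[i][j]
--             colSums[i][j] = runSum
--     return colSums
-- ===== SOURCE B (Python) =====
-- from typing import List
--
-- def getColSums(grid: List[List[int]]) -> List[List[int]]:
--     n = len(grid[0])
--     prev = [0] * n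
--     out = []
--     for row in grid:
--         prev = [p + row[j] for j, p in enumerate(prev)]
--         out.append(prev)
--     return out
-- ===== Notes on version B (the rewrite author's own statement) =====
-- stated objective: alternative
-- what changed: B traverses the grid row-major in a single pass, maintaining the previous prefix row as a vector accumulator and building each output row from it with a list comprehension, instead of A's column-major double loop that pre-allocates a zero matrix and mutates it cell by cell with a per-column scalar running sum.
import Mathlib
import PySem

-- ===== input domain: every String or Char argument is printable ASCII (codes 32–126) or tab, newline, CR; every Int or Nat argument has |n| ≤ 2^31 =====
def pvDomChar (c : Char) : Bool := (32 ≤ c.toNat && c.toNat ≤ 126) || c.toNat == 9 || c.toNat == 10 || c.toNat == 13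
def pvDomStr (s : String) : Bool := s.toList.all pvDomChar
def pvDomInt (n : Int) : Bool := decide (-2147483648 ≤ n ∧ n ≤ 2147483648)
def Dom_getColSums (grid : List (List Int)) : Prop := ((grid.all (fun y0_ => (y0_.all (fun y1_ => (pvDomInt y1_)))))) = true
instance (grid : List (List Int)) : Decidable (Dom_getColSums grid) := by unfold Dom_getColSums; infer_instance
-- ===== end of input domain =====

-- B re-implements A's column-wise prefix sums by a single row-major pass that carries
-- the previous prefix row as a vector accumulator (same cost; different traversal and state).

-- ===== PORT A =====
-- Literal port of A: zero matrix of shape m×n, then for each column j a scalar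
-- running sum down the rows, written cell by cell (range(m)/range(n) over
-- nonnegative bounds ported as List.range; in-range indexing ported with getD).
def getColSums (grid : List (List Int)) : List (List Int) :=
  let m := grid.length
  let n := (grid.headD []).length
  let colSums := List.replicate m (List.replicate n (0 : Int))
  (List.range n).foldl
    (fun cs j =>
      ((List.range m).foldl
        (fun (st : Int × List (List Int)) i =>
          let runSum := st.1 + (grid.getD i []).getD j 0
          (runSum, st.2.set i ((st.2.getD i []).set j runSum)))
        (0, cs)).2)
    colSums

-- ===== PORT B =====
-- Literal port of B: one fold over the rows; the accumulator carries the previous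
-- prefix row (enumerate ported with PySem.List.enumerate, row[j] with pyGetD).
def getColSums_alt (grid : List (List Int)) : List (List Int) :=
  let n := (grid.headD []).length
  (grid.foldl
    (fun (st : List Int × List (List Int)) row =>
      let prev := (PySem.List.enumerate st.1).map (fun jp => jp.2 + PySem.List.pyGetD row jp.1 0)
      (prev, st.2 ++ [prev]))
    (List.replicate n (0 : Int), [])).2

-- ===== PRECONDITION & SPEC =====
-- Pre_ excludes exactly the inputs where Python A raises IndexError: the empty grid
-- (grid[0]) and ragged grids with a row shorter than the first row (grid[i][j]).
def Pre_getColSums (grid : List (List Int)) : Prop :=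
  grid ≠ [] ∧ ∀ r ∈ grid, (grid.headD []).length ≤ r.length
instance (grid : List (List Int)) : Decidable (Pre_getColSums grid) := by
  unfold Pre_getColSums; infer_instance
def pvWitness_getColSums : List (List Int) := [[1, 2], [3, 4], [5, 6]]
def Spec_getColSums (grid : List (List Int)) (out : List (List Int)) : Prop := out = getColSums_alt grid
instance (grid : List (List Int)) (out : List (List Int)) : Decidable (Spec_getColSums grid out) := by unfold Spec_getColSums; infer_instance

-- ===== CLAIM (what is proved, stated in full; the proofs are below) =====
def Claim_equal_getColSums : Prop := ∀ (grid : List (List Int)), Dom_getColSums grid → Pre_getColSums grid → Spec_getColSums grid (getColSums grid)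

-- ===== LEMMAS AND PROOFS =====

-- column-j prefix sum of the first t rows
def pvS (grid : List (List Int)) (t j : Nat) : Int :=
  ((List.range t).map (fun k => (grid.getD k []).getD j 0)).sum

theorem pvS_succ (grid : List (List Int)) (t j : Nat) :
    pvS grid (t + 1) j = pvS grid t j + (grid.getD t []).getD j 0 := by
  simp [pvS, List.range_succ]

theorem pvS_cons_succ (r : List Int) (rs : List (List Int)) (t j : Nat) :
    pvS (r :: rs) (t + 1) j = r.getD j 0 + pvS rs t j := by
  simp [pvS, List.range_succ_eq_map, List.map_map, Function.comp_def]

theorem pv_mapIdx_id {α : Type} (xs : List α) : xs.mapIdx (fun _ x => x) = xs := by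
  apply List.ext_getElem <;> simp

-- A's inner loop (column j, rows 0..t-1) characterized
theorem pv_innerA (grid : List (List Int)) (j t : Nat) (cs : List (List Int))
    (ht : t ≤ cs.length) :
    (List.range t).foldl
      (fun (st : Int × List (List Int)) i =>
        let runSum := st.1 + (grid.getD i []).getD j 0
        (runSum, st.2.set i ((st.2.getD i []).set j runSum)))
      (0, cs)
    = (pvS grid t j, cs.mapIdx (fun i row => if i < t then row.set j (pvS grid (i + 1) j) else row)) := by
  induction t with
  | zero => simp [pvS, pv_mapIdx_id]
  | succ t ih =>
    rw [List.range_succ, List.foldl_append, ih (by omega)]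
    simp only [List.foldl_cons, List.foldl_nil]
    refine Prod.ext ?_ ?_
    · simp [pvS_succ]
    · simp only []
      set Mt := cs.mapIdx (fun i row => if i < t then row.set j (pvS grid (i + 1) j) else row) with hMt
      have hlen : Mt.length = cs.length := by simp [hMt]
      have hget : Mt.getD t [] = cs[t] := by
        rw [List.getD_eq_getElem?_getD, List.getElem?_eq_getElem (by omega), Option.getD_some]
        simp only [hMt, List.getElem_mapIdx]
        rw [if_neg (by omega)]
        rfl
      apply List.ext_getElem
      · simp [hMt]
      · intro i h1 h2
        have hi : i < cs.length := by simpa [hMt] using h2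
        rw [List.getElem_set]
        by_cases hit : t = i
        · subst hit
          rw [if_pos rfl, hget, List.getElem_mapIdx, if_pos (by omega), pvS_succ]
          rfl
        · rw [if_neg hit]
          have h3 : i < Mt.length := by omega
          show Mt[i] = _
          simp only [hMt, List.getElem_mapIdx]
          split_ifs <;> first | rfl | omega

-- drop the 'if i < m' when the matrix has at most m rows
theorem pv_mapIdx_if (m : Nat) (cs : List (List Int)) (f : Nat → List Int → List Int)
    (h : cs.length ≤ m) :
    cs.mapIdx (fun i row => if i < m then f i row else row) = cs.mapIdx f := by
  apply List.ext_getElem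
  · simp
  · intro i h1 h2
    rw [List.getElem_mapIdx, List.getElem_mapIdx, if_pos (by simp at h1; omega)]

-- mapIdx composes
theorem pv_mapIdx_mapIdx {α : Type} (cs : List α) (f g : Nat → α → α) :
    (cs.mapIdx f).mapIdx g = cs.mapIdx (fun i x => g i (f i x)) := by
  apply List.ext_getElem
  · simp
  · intro i h1 h2
    simp [List.getElem_mapIdx]

-- A's outer loop: fold of per-column updates = per-row fold of cell writes
theorem pv_outerA (grid : List (List Int)) (js : List Nat) (cs : List (List Int)) :
    js.foldl (fun cs j => cs.mapIdx (fun i row => row.set j (pvS grid (i + 1) j))) cs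
    = cs.mapIdx (fun i row => js.foldl (fun r j => r.set j (pvS grid (i + 1) j)) row) := by
  induction js generalizing cs with
  | nil => simp [pv_mapIdx_id]
  | cons j js ih => rw [List.foldl_cons, ih, pv_mapIdx_mapIdx]; simp

-- the real outer step equals the mapIdx step (matrix keeps m = cs.length rows)
theorem pv_foldA (grid : List (List Int)) (m : Nat) (js : List Nat) (cs : List (List Int))
    (h : cs.length = m) :
    js.foldl
      (fun cs j =>
        ((List.range m).foldl
          (fun (st : Int × List (List Int)) i =>
            let runSum := st.1 + (grid.getD i []).getD j 0
            (runSum, st.2.set i ((st.2.getD i []).set j runSum)))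
          (0, cs)).2)
      cs
    = js.foldl (fun cs j => cs.mapIdx (fun i row => row.set j (pvS grid (i + 1) j))) cs := by
  induction js generalizing cs with
  | nil => rfl
  | cons j js ih =>
    rw [List.foldl_cons, List.foldl_cons, pv_innerA grid j m cs (by omega),
        pv_mapIdx_if m cs _ (by omega)]
    exact ih _ (by simp [h])

-- filling a length-n row cell by cell over range n yields the map
theorem pv_fill (v : Nat → Int) (t : Nat) (row : List Int) (h : t ≤ row.length) :
    (List.range t).foldl (fun r j => r.set j (v j)) row
    = (List.range t).map v ++ row.drop t := by
  induction t with
  | zero => simp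
  | succ t ih =>
    rw [List.range_succ, List.foldl_append, ih (by omega)]
    simp only [List.foldl_cons, List.foldl_nil]
    rw [List.set_append]
    simp only [List.length_map, List.length_range]
    rw [if_neg (by omega), Nat.sub_self, List.map_append]
    have : row.drop t = row[t] :: row.drop (t + 1) := List.drop_eq_getElem_cons (by omega)
    rw [this, List.set_cons_zero]
    simp

theorem pv_mapIdx_replicate {α : Type} (m : Nat) (x : α) (f : Nat → α → α) :
    (List.replicate m x).mapIdx f = (List.range m).map (fun i => f i x) := by
  apply List.ext_getElem
  · simp
  · intro i h1 h2
    simp [List.getElem_mapIdx]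

-- A computes the prefix-sum matrix in closed (range-map) form
theorem pv_A_eq (grid : List (List Int)) :
    getColSums grid
    = (List.range grid.length).map (fun i =>
        (List.range (grid.headD []).length).map (fun j => pvS grid (i + 1) j)) := by
  unfold getColSums
  simp only []
  rw [pv_foldA grid grid.length _ _ (by simp), pv_outerA, pv_mapIdx_replicate]
  apply List.map_congr_left
  intro i _
  rw [pv_fill _ _ _ (by simp)]
  simp

-- B's scan, written structurally
def pvScan (v : List Int) : List (List Int) → List (List Int)
  | [] => []
  | r :: rs =>
    let w := (PySem.List.enumerate v).map (fun jp => jp.2 + PySem.List.pyGetD r jp.1 0)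
    w :: pvScan w rs

theorem pv_foldB (rs : List (List Int)) (v : List Int) (acc : List (List Int)) :
    (rs.foldl
      (fun (st : List Int × List (List Int)) row =>
        let prev := (PySem.List.enumerate st.1).map (fun jp => jp.2 + PySem.List.pyGetD row jp.1 0)
        (prev, st.2 ++ [prev]))
      (v, acc)).2 = acc ++ pvScan v rs := by
  induction rs generalizing v acc with
  | nil => simp [pvScan]
  | cons r rs ih => rw [List.foldl_cons, pvScan]; simp only []; rw [ih]; simp

-- one step of B's accumulator, as a range map
theorem pv_stepB (v r : List Int) :
    (PySem.List.enumerate v).map (fun jp => jp.2 + PySem.List.pyGetD r jp.1 0)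
    = (List.range v.length).map (fun j => v.getD j 0 + r.getD j 0) := by
  apply List.ext_getElem
  · simp [PySem.List.length_enumerate]
  · intro i h1 h2
    have hi : i < v.length := by simpa [PySem.List.length_enumerate] using h1
    rw [List.getElem_map, List.getElem_map, PySem.List.getElem_enumerate]
    simp [PySem.List.pyGetD_natCast, List.getD_eq_getElem?_getD, List.getElem?_eq_getElem hi]

-- B's scan in closed form
theorem pv_scan_eq (rs : List (List Int)) (v : List Int) :
    pvScan v rs
    = (List.range rs.length).map (fun i =>
        (List.range v.length).map (fun j => v.getD j 0 + pvS rs (i + 1) j)) := by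
  induction rs generalizing v with
  | nil => simp [pvScan]
  | cons r rs ih =>
    rw [pvScan]
    rw [pv_stepB, ih]
    have hlen : ((List.range v.length).map (fun j => v.getD j 0 + r.getD j 0)).length = v.length := by simp
    rw [hlen]
    rw [List.length_cons, List.range_succ_eq_map, List.map_cons, List.map_map]
    congr 1
    · apply List.map_congr_left
      intro j hj
      have : pvS (r :: rs) 1 j = r.getD j 0 := by
        simp [pvS]
      rw [this]
    · apply List.map_congr_left
      intro i _
      simp only [Function.comp]
      apply List.map_congr_left
      intro j hj
      have hjv : j < v.length := List.mem_range.mp hj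
      rw [List.getD_eq_getElem?_getD, List.getElem?_map, List.getElem?_range hjv]
      simp [pvS_cons_succ, add_assoc]

theorem pv_B_eq (grid : List (List Int)) :
    getColSums_alt grid
    = (List.range grid.length).map (fun i =>
        (List.range (grid.headD []).length).map (fun j => pvS grid (i + 1) j)) := by
  unfold getColSums_alt
  simp only []
  rw [pv_foldB, List.nil_append, pv_scan_eq]
  simp

-- ===== VERDICT (by name: the statement is the Claim_ definition above) =====
theorem getColSums_spec : Claim_equal_getColSums := by
  intro grid _ _
  unfold Spec_getColSums
  rw [pv_A_eq, pv_B_eq]
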